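-- pv_equiv track=rewrite | github.com/Stephen2526/Structure-informed_PLM | data_scripts/process_msa.py | gapPrune
-- ===== SOURCE A (Python) =====
-- def gapPrune(seq):
-- 	outp_seq_noGap = '' # aligned seq with no gap
-- 	gap_pos = [] # position reference: aligned MSA(BLAT_ECOLX_Evmutation.fasta)
-- 	for c in range(len(seq)):
-- 		if seq[c] == '-':
-- 			gap_pos.append(str(c))
-- 		else:
-- 			outp_seq_noGap += seq[c]
--
-- 	return outp_seq_noGap, '_'.join(gap_pos)
-- ===== SOURCE B (Python) =====
-- def gapPrune(seq):
-- 	parts = seq.split('-')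
-- 	gap_pos = []
-- 	pos = 0
-- 	for part in parts[:-1]:
-- 		pos += len(part)
-- 		gap_pos.append(str(pos))
-- 		pos += 1
-- 	return ''.join(parts), '_'.join(gap_pos)
-- ===== Notes on version B (the rewrite author's own statement) =====
-- stated objective: faster
-- what changed: Instead of scanning the string character by character, B splits the sequence at the gap character into segments, joins the segments for the pruned sequence, and reconstructs the gap positions as running prefix sums of the segment lengths.
import Mathlib
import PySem

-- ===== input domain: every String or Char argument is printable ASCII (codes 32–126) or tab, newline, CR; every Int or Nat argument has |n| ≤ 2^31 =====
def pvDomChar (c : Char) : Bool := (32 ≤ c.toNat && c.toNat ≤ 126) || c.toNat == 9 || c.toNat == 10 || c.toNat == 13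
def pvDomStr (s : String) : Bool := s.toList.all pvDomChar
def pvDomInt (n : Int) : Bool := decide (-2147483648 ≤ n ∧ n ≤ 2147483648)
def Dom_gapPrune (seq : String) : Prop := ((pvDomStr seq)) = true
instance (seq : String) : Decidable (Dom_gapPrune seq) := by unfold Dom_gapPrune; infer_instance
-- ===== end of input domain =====

-- B replaces A's character-by-character scan with a split at '-' : it joins the segments
-- for the pruned sequence and recovers the gap positions as prefix sums of segment lengths;
-- objective: faster (C-level split/join instead of a per-character Python loop; measured).

-- ===== PORT A =====
-- one loop over range(len(seq)); state = (outp_seq_noGap, gap_pos)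
def gapPrune (seq : String) : String × String :=
  let r := (PySem.List.pyRange 0 (seq.toList.length : Int) 1).foldl
    (fun (acc : List Char × List String) c =>
      if PySem.List.pyGetD seq.toList c ' ' == '-' then
        (acc.1, acc.2 ++ [PySem.Int.toStr c])
      else
        (acc.1 ++ [PySem.List.pyGetD seq.toList c ' '], acc.2))
    ([], [])
  (String.ofList r.1, PySem.Str.join "_" r.2)

-- ===== PORT B =====
-- parts = seq.split('-'); loop over parts[:-1] with a running position; ''.join / '_'.join
def gapPrune_alt (seq : String) : String × String :=
  let parts := PySem.Chars.splitOn seq.toList ['-']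
  let r := (PySem.List.slice parts none (some (-1))).foldl
    (fun (acc : List String × Int) part =>
      let pos := acc.2 + (part.length : Int)
      (acc.1 ++ [PySem.Int.toStr pos], pos + 1))
    ([], 0)
  (String.ofList (PySem.Chars.join [] parts), PySem.Str.join "_" r.1)

-- ===== PRECONDITION & SPEC =====
def Spec_gapPrune (seq : String) (out : String × String) : Prop := out = gapPrune_alt seq
instance (seq : String) (out : String × String) : Decidable (Spec_gapPrune seq out) := by unfold Spec_gapPrune; infer_instance

-- ===== CLAIM (what is proved, stated in full; the proofs are below) =====
def Claim_equal_gapPrune : Prop := ∀ (seq : String), Dom_gapPrune seq → Spec_gapPrune seq (gapPrune seq)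

-- ===== LEMMAS AND PROOFS =====

-- structural split of a char list at '-' : (first segment, remaining segments)
def pvSplitDash : List Char → List Char × List (List Char)
  | [] => ([], [])
  | c :: t =>
    let p := pvSplitDash t
    if c = '-' then ([], p.1 :: p.2) else (c :: p.1, p.2)

-- PySem's fuel-based splitOn at sep = ['-'] computes pvSplitDash
theorem splitOn_go_dash (fuel : Nat) (l cur : List Char) (acc : List (List Char))
    (hl : l.length < fuel) :
    PySem.Chars.splitOn.go ['-'] fuel l cur acc
      = acc.reverse ++ (cur.reverse ++ (pvSplitDash l).1) :: (pvSplitDash l).2 := by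
  induction fuel generalizing l cur acc with
  | zero => omega
  | succ n ih =>
    cases l with
    | nil => simp [PySem.Chars.splitOn.go, pvSplitDash]
    | cons c t =>
      have ht : t.length < n := by simp at hl; omega
      rw [PySem.Chars.splitOn.go]
      by_cases h : c = '-'
      · have hp : List.isPrefixOf ['-'] (c :: t) = true := by simp [List.isPrefixOf, h]
        rw [hp, if_pos rfl]
        rw [show List.drop (['-'] : List Char).length (c :: t) = t from rfl, ih t [] _ ht]
        simp [pvSplitDash, h]
      · have hp : List.isPrefixOf ['-'] (c :: t) = false := by
          simp [List.isPrefixOf]; exact fun hc => (h hc.symm).elim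
        rw [hp, if_neg (by simp), ih t (c :: cur) acc ht]
        simp [pvSplitDash, h]

theorem splitOn_dash (l : List Char) :
    PySem.Chars.splitOn l ['-'] = (pvSplitDash l).1 :: (pvSplitDash l).2 := by
  rw [PySem.Chars.splitOn]
  rw [splitOn_go_dash (l.length + 1) l [] [] (by omega)]
  simp

-- joining the segments gives exactly the non-gap characters
theorem splitDash_flatten (l : List Char) :
    (pvSplitDash l).1 ++ (pvSplitDash l).2.flatten = l.filter (fun c => !(c == '-')) := by
  induction l with
  | nil => simp [pvSplitDash]
  | cons c t ih =>
    by_cases h : c = '-'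
    · simp [pvSplitDash, h, ih]
    · simp [pvSplitDash, h, ih]

-- B's step function over segments
def pvStep (acc : List String × Int) (part : List Char) : List String × Int :=
  (acc.1 ++ [PySem.Int.toStr (acc.2 + (part.length : Int))], acc.2 + (part.length : Int) + 1)

-- A's gap positions, as a filterMap over enumerate
def pvGaps (l : List Char) (s : Int) : List String :=
  (PySem.List.enumerate l s).filterMap
    (fun p => if p.2 == '-' then some (PySem.Int.toStr p.1) else none)

-- folding B's step over ALL segments yields the gap positions plus one extra
-- entry at the position just past the end of the string
theorem fold_step_all (l : List Char) (s : Int) (g : List String) :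
    ((pvSplitDash l).1 :: (pvSplitDash l).2).foldl pvStep (g, s)
      = (g ++ pvGaps l s ++ [PySem.Int.toStr (s + l.length)], s + l.length + 1) := by
  induction l generalizing s g with
  | nil => simp [pvSplitDash, pvGaps, PySem.List.enumerate_nil, pvStep]
  | cons c t ih =>
    by_cases h : c = '-'
    · have : pvSplitDash (c :: t) = ([], (pvSplitDash t).1 :: (pvSplitDash t).2) := by
        simp [pvSplitDash, h]
      rw [this]
      show List.foldl pvStep (pvStep (g, s) []) _ = _
      have hstep : pvStep (g, s) [] = (g ++ [PySem.Int.toStr s], s + 1) := by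
        simp [pvStep]
      rw [hstep, ih (s + 1) (g ++ [PySem.Int.toStr s])]
      have hg : pvGaps (c :: t) s = PySem.Int.toStr s :: pvGaps t (s + 1) := by
        simp [pvGaps, PySem.List.enumerate_cons, h]
      rw [hg]
      simp only [List.length_cons, Nat.cast_add, Nat.cast_one]
      rw [show s + 1 + (t.length : Int) = s + ((t.length : Int) + 1) from by ring]
      simp [List.append_assoc]
    · have hsp : pvSplitDash (c :: t) = (c :: (pvSplitDash t).1, (pvSplitDash t).2) := by
        simp [pvSplitDash, h]
      rw [hsp]
      show List.foldl pvStep (pvStep (g, s) (c :: (pvSplitDash t).1)) _ = _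
      have hstep : pvStep (g, s) (c :: (pvSplitDash t).1) = pvStep (g, s + 1) (pvSplitDash t).1 := by
        simp [pvStep]; constructor <;> [congr 1; skip] <;> ring
      rw [hstep]
      have := ih (s + 1) g
      rw [List.foldl_cons] at this
      rw [this]
      have hg : pvGaps (c :: t) s = pvGaps t (s + 1) := by
        simp [pvGaps, PySem.List.enumerate_cons, h]
      rw [hg]
      simp only [List.length_cons, Nat.cast_add, Nat.cast_one]
      rw [show s + 1 + (t.length : Int) = s + ((t.length : Int) + 1) from by ring]

-- taking the last segment off: parts[:-1] is dropLast
theorem slice_neg_one {α : Type} (xs : List α) :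
    PySem.List.slice xs none (some (-1)) = xs.dropLast := by
  cases xs with
  | nil => rfl
  | cons x t =>
    simp only [PySem.List.slice, PySem.List.clampIdx, List.dropLast_eq_take, List.length_cons,
      List.drop_zero]
    split_ifs <;> (congr 1; omega)

-- the fold over dropLast produces exactly the gap positions
theorem fold_step_dropLast (l : List Char) :
    (((pvSplitDash l).1 :: (pvSplitDash l).2).dropLast.foldl pvStep ([], 0)).1
      = pvGaps l 0 := by
  obtain ⟨ps, p, hps⟩ : ∃ ps p, (pvSplitDash l).1 :: (pvSplitDash l).2 = ps ++ [p] := by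
    refine ⟨((pvSplitDash l).1 :: (pvSplitDash l).2).dropLast,
      ((pvSplitDash l).1 :: (pvSplitDash l).2).getLast (by simp), ?_⟩
    exact (List.dropLast_append_getLast (by simp)).symm
  have hfull := fold_step_all l 0 []
  rw [hps] at hfull
  rw [List.foldl_append] at hfull
  simp only [List.foldl_cons, List.foldl_nil] at hfull
  have hd : ((pvSplitDash l).1 :: (pvSplitDash l).2).dropLast = ps := by
    rw [hps]; simp
  rw [hd]
  set r := List.foldl pvStep ([], 0) ps with hr
  have h1 : r.1 ++ [PySem.Int.toStr (r.2 + (p.length : Int))]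
      = ([] ++ pvGaps l 0) ++ [PySem.Int.toStr ((0:Int) + (l.length : Int))] := by
    have h2 := congrArg Prod.fst hfull
    simpa [pvStep] using h2
  have := (List.append_inj' h1 (by simp)).1
  simpa using this

-- A's loop, folded over enumerate, appends the non-gap chars and the gap positions.
theorem gapPrune_loop (cs : List Char) (s : Int) (a : List Char) (g : List String) :
    (PySem.List.enumerate cs s).foldl
      (fun (acc : List Char × List String) p =>
        if p.2 == '-' then (acc.1, acc.2 ++ [PySem.Int.toStr p.1])
        else (acc.1 ++ [p.2], acc.2)) (a, g)
    = (a ++ cs.filter (fun c => !(c == '-')), g ++ pvGaps cs s) := by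
  induction cs generalizing s a g with
  | nil => simp [PySem.List.enumerate_nil, pvGaps]
  | cons c t ih =>
    rw [PySem.List.enumerate_cons, List.foldl_cons]
    by_cases h : c = '-'
    · simp only [h, beq_self_eq_true, if_true]
      rw [ih]
      simp [pvGaps, PySem.List.enumerate_cons]
    · have hb : (c == '-') = false := by simp [h]
      simp only [hb, Bool.false_eq_true, if_false]
      rw [ih]
      simp [pvGaps, PySem.List.enumerate_cons, h]

-- join with empty separator is flatten
theorem join_nil_flatten (ps : List (List Char)) :
    PySem.Chars.join [] ps = ps.flatten := by
  induction ps with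
  | nil => simp [PySem.Chars.join_nil]
  | cons p t ih =>
    cases t with
    | nil => simp [PySem.Chars.join, List.intercalate]
    | cons q r =>
      simp [PySem.Chars.join, List.intercalate] at ih ⊢
      simpa using ih

-- ===== VERDICT (by name: the statement is the Claim_ definition above) =====
theorem gapPrune_spec : Claim_equal_gapPrune := by
  intro seq _
  unfold Spec_gapPrune gapPrune gapPrune_alt
  dsimp only
  have hA := gapPrune_loop seq.toList 0 [] []
  rw [PySem.List.enumerate_eq_map_pyRange seq.toList ' '] at hA
  rw [List.foldl_map] at hA
  simp only [PySem.List.len_eq] at hA ⊢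
  rw [hA]
  rw [splitOn_dash, slice_neg_one, join_nil_flatten]
  have hB : (((pvSplitDash seq.toList).1 :: (pvSplitDash seq.toList).2).dropLast.foldl
      (fun (acc : List String × Int) part =>
        (acc.1 ++ [PySem.Int.toStr (acc.2 + (part.length : Int))],
          acc.2 + (part.length : Int) + 1)) ([], 0)).1 = pvGaps seq.toList 0 := by
    have := fold_step_dropLast seq.toList
    simpa [pvStep] using this
  rw [hB]
  rw [show ((pvSplitDash seq.toList).1 :: (pvSplitDash seq.toList).2).flatten
      = (pvSplitDash seq.toList).1 ++ (pvSplitDash seq.toList).2.flatten from by simp,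
    splitDash_flatten]
  simp
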